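-- pv_equiv track=rewrite | github.com/danwflynn/ARM-LEGv8-CPU | schematic_generator.py | strip_verilog
-- ===== SOURCE A (Python) =====
-- def strip_verilog(lines):
--   result = []
--   in_block_comment = False
--   for line in lines:
--     i = 0
--     stripped_line = ""
--     while i < len(line):
--       if not in_block_comment:
--         if line.startswith("/*", i):
--           in_block_comment = True
--           i += 2
--           continue
--         if line.startswith("//", i) or line.startswith("`", i):
--           break
--         stripped_line += line[i]
--         i += 1
--       else:
--         if line.startswith("*/", i):
--           in_block_comment = False
--           i += 2
--         else:
--           i += 1
--     stripped_line = stripped_line.strip()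
--     if not stripped_line:
--         continue
--     parts = stripped_line.split(';')
--     for idx, part in enumerate(parts):
--       part = part.strip()
--       if not part:
--         continue
--       if idx < len(parts) - 1:
--         result.append(part + ';')
--       else:
--         if stripped_line.endswith(';'):
--           result.append(part + ';')
--         else:
--           result.append(part)
--   return result
-- ===== SOURCE B (Python) =====
-- def _clean_line(line, in_block):
--     """Return (line with comments removed, block-comment state after the line).
--
--     Jumps between comment delimiters with str.find instead of stepping
--     character by character."""
--     n = len(line)
--     pieces = []
--     i = 0
--     while i < n:
--         if in_block:
--             j = line.find('*/', i)
--             if j < 0: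
--                 return ''.join(pieces), True
--             i = j + 2
--             in_block = False
--         else:
--             j = _earliest(_earliest(line.find('/*', i), line.find('//', i)),
--                           line.find('`', i))
--             if j < 0:
--                 pieces.append(line[i:])
--                 break
--             pieces.append(line[i:j])
--             if line.startswith('/*', j):
--                 in_block = True
--                 i = j + 2
--             else:
--                 # '//' or '`': the rest of the line is a comment
--                 return ''.join(pieces), False
--     return ''.join(pieces), in_block
--
--
-- def _earliest(a, b):
--     """Earliest of two str.find results (-1 means 'not found')."""
--     if a < 0:
--         return b
--     if b < 0:
--         return a
--     return a if a < b else b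
--
--
-- def strip_verilog(lines):
--     # Phase 1: strip comments, collect the non-blank cleaned lines.
--     cleaned = []
--     in_block = False
--     for line in lines:
--         s, in_block = _clean_line(line, in_block)
--         s = s.strip()
--         if s:
--             cleaned.append(s)
--     # Phase 2: cut each cleaned line at ';'.
--     result = []
--     for s in cleaned:
--         parts = [p.strip() for p in s.split(';')]
--         if s.endswith(';'):
--             result += [p + ';' for p in parts if p]
--         else:
--             result += [p + ';' for p in parts[:-1] if p]
--             if parts[-1]:
--                 result.append(parts[-1])
--     return result
-- ===== Notes on version B (the rewrite author's own statement) =====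
-- stated objective: alternative
-- what changed: A's single char-by-char loop that interleaves comment stripping with semicolon emission is replaced by two phases: a comment stripper that jumps between delimiters with str.find, collecting cleaned lines, then a separate pass that splits each cleaned line on ';' with list slicing/comprehensions instead of an enumerate loop.
import Mathlib
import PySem

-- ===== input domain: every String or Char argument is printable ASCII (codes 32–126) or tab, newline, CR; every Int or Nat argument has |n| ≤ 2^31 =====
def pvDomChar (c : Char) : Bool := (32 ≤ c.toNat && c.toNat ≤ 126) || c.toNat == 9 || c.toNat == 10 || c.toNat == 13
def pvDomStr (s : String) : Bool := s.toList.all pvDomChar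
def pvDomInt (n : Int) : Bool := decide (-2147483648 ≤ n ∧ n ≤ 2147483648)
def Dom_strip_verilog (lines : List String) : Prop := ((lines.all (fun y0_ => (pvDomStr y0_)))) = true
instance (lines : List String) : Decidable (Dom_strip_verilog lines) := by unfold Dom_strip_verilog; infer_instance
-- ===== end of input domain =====

-- B replaces A's single loop (char-by-char scan interleaved with per-line emission) by two phases:
-- a comment-stripping pass that JUMPS between delimiters with str.find, then a separate
-- semicolon-splitting pass over the cleaned lines (objective: alternative decomposition).

-- ===== PORT A =====
-- A's inner while loop: index i, flag in_block_comment, accumulator stripped_line.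
-- line.startswith(pat, i) with 0 ≤ i is PySem.Chars.startswith on line.drop i (exact).
def stripLineA (line : List Char) (inb : Bool) (i : Nat) (acc : List Char) :
    List Char × Bool :=
  if h : i < line.length then
    if inb = false then
      if PySem.Chars.startswith (line.drop i) ['/', '*'] then
        stripLineA line true (i + 2) acc
      else if PySem.Chars.startswith (line.drop i) ['/', '/'] ||
              PySem.Chars.startswith (line.drop i) ['`'] then
        (acc, inb)                                   -- break
      else
        stripLineA line inb (i + 1) (acc ++ [line.get ⟨i, h⟩])
    else
      if PySem.Chars.startswith (line.drop i) ['*', '/'] then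
        stripLineA line false (i + 2) acc
      else
        stripLineA line inb (i + 1) acc
  else (acc, inb)
termination_by line.length - i
decreasing_by all_goals omega

-- A's inner for idx, part in enumerate(parts) loop over parts = stripped_line.split(';')
def emitA (s : List Char) (result : List String) : List String :=
  let parts := PySem.Chars.splitOn s [';']
  (PySem.List.enumerate parts 0).foldl (fun res ip =>
    let part := PySem.Chars.strip ip.2
    if part = [] then res                            -- continue
    else if ip.1 < (parts.length : Int) - 1 then res ++ [String.ofList (part ++ [';'])]
    else if PySem.Chars.endswith s [';'] then res ++ [String.ofList (part ++ [';'])]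
    else res ++ [String.ofList part]) result

def strip_verilog (lines : List String) : List String :=
  (lines.foldl (fun st line =>
    let r := stripLineA line.toList st.2 0 []        -- the while loop
    let s := PySem.Chars.strip r.1                   -- stripped_line.strip()
    if s = [] then (st.1, r.2)                       -- continue
    else (emitA s st.1, r.2)) (([] : List String), false)).1

-- ===== PORT B =====
def earliestB (a b : Int) : Int :=
  if a < 0 then b else if b < 0 then a else if a < b then a else b

-- termination helper for cleanLineB (cited in its decreasing_by)
theorem earliestB_ge {m : Int} (a b : Int) (ha : 0 ≤ a → m ≤ a) (hb : 0 ≤ b → m ≤ b) :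
    0 ≤ earliestB a b → m ≤ earliestB a b := by
  unfold earliestB; split_ifs <;> omega

-- B's find-jumping scanner _clean_line; pieces collects the copied chunks, ''.join = Chars.join [].
def cleanLineB (line : List Char) (inb : Bool) (i : Nat) (pieces : List (List Char)) :
    List Char × Bool :=
  if h : i < line.length then
    if inb then
      let j := PySem.Chars.findFrom line ['*', '/'] (i : Int)
      if hj : j < 0 then (PySem.Chars.join [] pieces, true)
      else cleanLineB line false (j.toNat + 2) pieces
    else
      let j := earliestB (earliestB (PySem.Chars.findFrom line ['/', '*'] (i : Int))
                                    (PySem.Chars.findFrom line ['/', '/'] (i : Int)))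
                         (PySem.Chars.findFrom line ['`'] (i : Int))
      if hj : j < 0 then
        (PySem.Chars.join [] (pieces ++ [PySem.Chars.slice line (some (i : Int)) none]), inb)
      else
        let pieces' := pieces ++ [PySem.Chars.slice line (some (i : Int)) (some j)]
        if hsw : PySem.Chars.startswith (line.drop j.toNat) ['/', '*'] then
          cleanLineB line true (j.toNat + 2) pieces'
        else (PySem.Chars.join [] pieces', false)    -- '//' or '`': drop rest of line
  else (PySem.Chars.join [] pieces, inb)
termination_by line.length - i
decreasing_by
  · -- '*/' found at j ≥ i, so j.toNat + 2 ≤ line.length and i < j.toNat + 2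
    have hk : i ≤ line.length := le_of_lt h
    have hne : PySem.Chars.findFrom line ['*', '/'] (i : Int) ≠ -1 := by omega
    obtain ⟨h1, h2, -⟩ := PySem.Chars.findFrom_natCast_spec line ['*', '/'] i hk hne
    have h3 := h2.length_le
    simp [List.length_drop] at h3
    omega
  · -- '/*' starts at j ≥ i, so j.toNat + 2 ≤ line.length and i < j.toNat + 2
    have hk : i ≤ line.length := le_of_lt h
    have h2 := (PySem.Chars.startswith_iff _ _).mp hsw
    have h3 := h2.length_le
    simp [List.length_drop] at h3
    have hga : ∀ sub, 0 ≤ PySem.Chars.findFrom line sub (i : Int) →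
        (i : Int) ≤ PySem.Chars.findFrom line sub (i : Int) := by
      intro sub hs
      exact (PySem.Chars.findFrom_natCast_spec line sub i hk (by omega)).1
    have hj' := not_lt.mp hj
    have hge := earliestB_ge _ _ (earliestB_ge _ _ (hga _) (hga _)) (hga _) hj'
    omega

-- B's per-line emission (phase 2 body)
def emitB (s : List Char) : List String :=
  let parts := (PySem.Chars.splitOn s [';']).map PySem.Chars.strip
  if PySem.Chars.endswith s [';'] then
    (parts.filter (· ≠ [])).map (fun p => String.ofList (p ++ [';']))
  else
    ((PySem.List.slice parts none (some (-1))).filter (· ≠ [])).map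
        (fun p => String.ofList (p ++ [';'])) ++
      (match PySem.List.pyGet? parts (-1) with
       | some t => if t ≠ [] then [String.ofList t] else []
       | none => [])                                 -- unreachable: split(';') is never empty
def strip_verilog_alt (lines : List String) : List String :=
  -- phase 1: strip comments, collect non-blank cleaned lines
  let cleaned := (lines.foldl (fun st line =>
    let r := cleanLineB line.toList st.2 0 []
    let s := PySem.Chars.strip r.1
    (if s = [] then st.1 else st.1 ++ [s], r.2)) (([] : List (List Char)), false)).1
  -- phase 2: cut each cleaned line at ';'
  cleaned.foldl (fun res s => res ++ emitB s) []

-- ===== PRECONDITION & SPEC =====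
def Spec_strip_verilog (lines : List String) (out : List String) : Prop := out = strip_verilog_alt lines
instance (lines : List String) (out : List String) : Decidable (Spec_strip_verilog lines out) := by unfold Spec_strip_verilog; infer_instance

-- ===== CLAIM (what is proved, stated in full; the proofs are below) =====
def Claim_equal_strip_verilog : Prop := ∀ (lines : List String), Dom_strip_verilog lines → Spec_strip_verilog lines (strip_verilog lines)

-- ===== LEMMAS AND PROOFS =====

theorem joinNil_eq_flatten (ps : List (List Char)) :
    PySem.Chars.join [] ps = ps.flatten := by
  show (List.intersperse ([] : List Char) ps).flatten = ps.flatten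
  induction ps with
  | nil => rfl
  | cons x xs ih =>
    cases xs with
    | nil => rfl
    | cons y ys => simp_all [List.intersperse]

-- if a marker is a prefix of line.drop k for some k ≥ i, it is an infix of line.drop i
theorem prefix_drop_infix (line sub : List Char) (i k : Nat) (hik : i ≤ k)
    (h : sub <+: line.drop k) : sub <:+: line.drop i := by
  have heq : line.drop k = (line.drop i).drop (k - i) := by
    rw [List.drop_drop]; congr 1; omega
  rw [heq] at h
  exact h.isInfix.trans (List.drop_suffix _ _).isInfix

theorem earliestB_cases (a b : Int) : earliestB a b = a ∨ earliestB a b = b := by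
  unfold earliestB; split_ifs <;> simp

theorem earliestB_neg_iff (a b : Int) : earliestB a b < 0 ↔ a < 0 ∧ b < 0 := by
  unfold earliestB; split_ifs <;> omega

theorem earliestB_le_left (a b : Int) (ha : 0 ≤ a) : earliestB a b ≤ a := by
  unfold earliestB; split_ifs <;> omega

theorem earliestB_le_right (a b : Int) (hb : 0 ≤ b) : earliestB a b ≤ b := by
  unfold earliestB; split_ifs <;> omega

-- A's block-mode scan skips positions where '*/' does not start
theorem stripLineA_block_skip (line : List Char) (acc : List Char) (i j : Nat)
    (hij : i ≤ j) (hj : j ≤ line.length)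
    (hno : ∀ k, i ≤ k → k < j → ¬ (['*', '/'] <+: line.drop k)) :
    stripLineA line true i acc = stripLineA line true j acc := by
  have aux : ∀ d i', i' ≤ j → j - i' ≤ d →
      (∀ k, i' ≤ k → k < j → ¬ (['*', '/'] <+: line.drop k)) →
      stripLineA line true i' acc = stripLineA line true j acc := by
    intro d
    induction d with
    | zero =>
      intro i' h1 h2 _
      have h0 : i' = j := by omega
      subst h0
      rfl
    | succ d ih =>
      intro i' h1 h2 hno'
      rcases eq_or_lt_of_le h1 with h0 | hlt
      · subst h0
        rfl
      · have hi : i' < line.length := by omega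
        rw [stripLineA, dif_pos hi]
        have hsw : PySem.Chars.startswith (line.drop i') ['*', '/'] = false := by
          rw [Bool.eq_false_iff]
          intro hc
          exact hno' i' le_rfl hlt ((PySem.Chars.startswith_iff _ _).mp hc)
        simp only [hsw, Bool.true_eq_false, if_false, Bool.false_eq_true]
        exact ih (i' + 1) (by omega) (by omega) (fun k hk1 hk2 => hno' k (by omega) hk2)
  exact aux (j - i) i hij le_rfl hno

-- A's normal-mode scan copies characters while no comment marker starts
theorem stripLineA_copy (line : List Char) (acc : List Char) (i j : Nat)
    (hij : i ≤ j) (hj : j ≤ line.length)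
    (hno : ∀ k, i ≤ k → k < j →
      ¬ (['/', '*'] <+: line.drop k) ∧ ¬ (['/', '/'] <+: line.drop k) ∧
      ¬ (['`'] <+: line.drop k)) :
    stripLineA line false i acc =
      stripLineA line false j (acc ++ (line.drop i).take (j - i)) := by
  have aux : ∀ d i' acc', i' ≤ j → j - i' ≤ d →
      (∀ k, i' ≤ k → k < j →
        ¬ (['/', '*'] <+: line.drop k) ∧ ¬ (['/', '/'] <+: line.drop k) ∧
        ¬ (['`'] <+: line.drop k)) →
      stripLineA line false i' acc' =
        stripLineA line false j (acc' ++ (line.drop i').take (j - i')) := by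
    intro d
    induction d with
    | zero =>
      intro i' acc' h1 h2 _
      have h0 : i' = j := by omega
      subst h0; simp
    | succ d ih =>
      intro i' acc' h1 h2 hno'
      rcases eq_or_lt_of_le h1 with h0 | hlt
      · subst h0; simp
      · have hi : i' < line.length := by omega
        rw [stripLineA, dif_pos hi]
        obtain ⟨hn1, hn2, hn3⟩ := hno' i' le_rfl hlt
        have hs1 : PySem.Chars.startswith (line.drop i') ['/', '*'] = false := by
          rw [Bool.eq_false_iff]; intro hc
          exact hn1 ((PySem.Chars.startswith_iff _ _).mp hc)
        have hs2 : PySem.Chars.startswith (line.drop i') ['/', '/'] = false := by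
          rw [Bool.eq_false_iff]; intro hc
          exact hn2 ((PySem.Chars.startswith_iff _ _).mp hc)
        have hs3 : PySem.Chars.startswith (line.drop i') ['`'] = false := by
          rw [Bool.eq_false_iff]; intro hc
          exact hn3 ((PySem.Chars.startswith_iff _ _).mp hc)
        simp only [hs1, hs2, hs3, Bool.false_eq_true, if_false, Bool.or_self,
          reduceIte]
        rw [ih (i' + 1) (acc' ++ [line.get ⟨i', hi⟩]) (by omega) (by omega)
              (fun k hk1 hk2 => hno' k (by omega) hk2)]
        congr 1
        rw [List.append_assoc]
        congr 1
        rw [List.drop_eq_getElem_cons hi]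
        have h5 : j - i' = (j - (i' + 1)) + 1 := by omega
        rw [h5, List.take_succ_cons]
        rfl
  exact aux (j - i) i acc hij le_rfl hno

-- the scanners agree (A's accumulator = flatten of B's piece list)
-- a negative findFrom means: the pattern starts nowhere at or after i
theorem findFrom_neg_none (line sub : List Char) (i : Nat) (hk : i ≤ line.length)
    (h : PySem.Chars.findFrom line sub (i : Int) < 0) :
    ∀ k, i ≤ k → ¬ (sub <+: line.drop k) := by
  have heq := PySem.Chars.findFrom_natCast line sub i hk
  by_cases hf : PySem.Chars.find (line.drop i) sub = -1
  · rw [hf, if_pos rfl] at heq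
    have hni := (PySem.Chars.findFrom_natCast_eq_neg_one_iff line sub i hk).mp heq
    intro k hik hpre
    exact hni (prefix_drop_infix line sub i k hik hpre)
  · have hge := PySem.Chars.neg_one_le_find (line.drop i) sub
    rw [if_neg hf] at heq
    omega

-- a non-negative findFrom gives the position, the match there, no match before
theorem findFrom_pos_facts (line sub : List Char) (i : Nat) (hk : i ≤ line.length)
    (h : 0 ≤ PySem.Chars.findFrom line sub (i : Int)) :
    (i : Int) ≤ PySem.Chars.findFrom line sub (i : Int) ∧
    sub <+: line.drop (PySem.Chars.findFrom line sub (i : Int)).toNat ∧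
    ∀ k, i ≤ k → k < (PySem.Chars.findFrom line sub (i : Int)).toNat →
      ¬ (sub <+: line.drop k) :=
  PySem.Chars.findFrom_natCast_spec line sub i hk (by omega)

theorem scan_eq (line : List Char) (i : Nat) (inb : Bool) (pieces : List (List Char)) :
    stripLineA line inb i pieces.flatten = cleanLineB line inb i pieces := by
  have aux : ∀ d i inb pieces, line.length - i ≤ d →
      stripLineA line inb i (List.flatten pieces) = cleanLineB line inb i pieces := by
    intro d
    induction d with
    | zero =>
      intro i inb pieces hle
      rw [stripLineA, cleanLineB, dif_neg (by omega : ¬ i < line.length),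
        dif_neg (by omega : ¬ i < line.length), joinNil_eq_flatten]
    | succ d ih =>
      intro i inb pieces hle
      by_cases hi : i < line.length
      case neg =>
        rw [stripLineA, cleanLineB, dif_neg hi, dif_neg hi, joinNil_eq_flatten]
      case pos =>
      have hk : i ≤ line.length := le_of_lt hi
      rw [cleanLineB, dif_pos hi]
      cases inb with
      | true =>
        by_cases hj : PySem.Chars.findFrom line ['*', '/'] (i : Int) < 0
        · rw [dif_pos hj]
          have hno := findFrom_neg_none line ['*', '/'] i hk hj
          rw [stripLineA_block_skip line (List.flatten pieces) i line.length hk le_rfl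
                (fun k h1 _ => hno k h1)]
          rw [stripLineA, dif_neg (lt_irrefl _), joinNil_eq_flatten]
          simp
        · rw [dif_neg hj]
          obtain ⟨h1, h2, h3⟩ := findFrom_pos_facts line ['*', '/'] i hk (by omega)
          have hlen := h2.length_le
          simp only [List.length_drop, List.length_cons, List.length_nil] at hlen
          set j := PySem.Chars.findFrom line ['*', '/'] (i : Int) with hjdef
          have hjn : j.toNat + 2 ≤ line.length := by omega
          rw [stripLineA_block_skip line (List.flatten pieces) i j.toNat
                (by omega) (by omega) (fun k hk1 hk2 => h3 k hk1 hk2)]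
          rw [stripLineA, dif_pos (by omega : j.toNat < line.length)]
          have hsw : PySem.Chars.startswith (line.drop j.toNat) ['*', '/'] = true :=
            (PySem.Chars.startswith_iff _ _).mpr h2
          simp only [Bool.true_eq_false, if_false, hsw, if_true]
          exact ih (j.toNat + 2) false pieces (by omega)
      | false =>
        have hcase : ∀ sub : List Char,
            (0 ≤ PySem.Chars.findFrom line sub (i : Int) →
              (i : Int) ≤ PySem.Chars.findFrom line sub (i : Int)) := by
          intro sub hs
          exact (findFrom_pos_facts line sub i hk hs).1
        set f1 := PySem.Chars.findFrom line ['/', '*'] (i : Int) with hf1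
        set f2 := PySem.Chars.findFrom line ['/', '/'] (i : Int) with hf2
        set f3 := PySem.Chars.findFrom line ['`'] (i : Int) with hf3
        set j := earliestB (earliestB f1 f2) f3 with hjdef
        by_cases hj : j < 0
        · rw [dif_pos hj]
          -- all three finds are negative: no marker anywhere at or after i
          have h12 : earliestB f1 f2 < 0 ∧ f3 < 0 := (earliestB_neg_iff _ _).mp hj
          have h12' : f1 < 0 ∧ f2 < 0 := (earliestB_neg_iff _ _).mp h12.1
          have hno1 := findFrom_neg_none line ['/', '*'] i hk h12'.1
          have hno2 := findFrom_neg_none line ['/', '/'] i hk h12'.2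
          have hno3 := findFrom_neg_none line ['`'] i hk h12.2
          rw [stripLineA_copy line (List.flatten pieces) i line.length hk le_rfl
                (fun k h1 _ => ⟨hno1 k h1, hno2 k h1, hno3 k h1⟩)]
          rw [stripLineA, dif_neg (lt_irrefl _), joinNil_eq_flatten]
          have htake : (line.drop i).take (line.length - i) = line.drop i := by
            apply List.take_of_length_le
            simp
          rw [htake, joinNil_eq_flatten]
          simp [PySem.List.slice_from_natCast]
        · rw [dif_neg hj]
          have hj0 : (0 : Int) ≤ j := by omega
          -- j is the position of the first marker: nothing before it, a marker at it
          have hjle : ∀ g : Int, g = f1 ∨ g = f2 ∨ g = f3 → 0 ≤ g → j ≤ g := by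
            intro g hg hg0
            rcases hg with rfl | rfl | rfl
            · have he12 : 0 ≤ earliestB f1 f2 := by
                have := (earliestB_neg_iff f1 f2).not
                omega
              calc j ≤ earliestB f1 f2 := earliestB_le_left _ _ he12
                _ ≤ f1 := earliestB_le_left _ _ hg0
            · have he12 : 0 ≤ earliestB f1 f2 := by
                have := (earliestB_neg_iff f1 f2).not
                omega
              calc j ≤ earliestB f1 f2 := earliestB_le_left _ _ he12
                _ ≤ f2 := earliestB_le_right _ _ hg0
            · exact earliestB_le_right _ _ hg0
          have hnob : ∀ (sub : List Char) (g : Int), g = f1 ∨ g = f2 ∨ g = f3 →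
              PySem.Chars.findFrom line sub (i : Int) = g →
              ∀ k, i ≤ k → k < j.toNat → ¬ (sub <+: line.drop k) := by
            intro sub g hg hgsub k hk1 hk2
            by_cases hgneg : g < 0
            · exact findFrom_neg_none line sub i hk (hgsub ▸ hgneg) k hk1
            · have hjg := hjle g hg (by omega)
              have := (findFrom_pos_facts line sub i hk (hgsub ▸ (by omega : (0:Int) ≤ g))).2.2
              rw [hgsub] at this
              exact this k hk1 (by omega)
          have hno : ∀ k, i ≤ k → k < j.toNat →
              ¬ (['/', '*'] <+: line.drop k) ∧ ¬ (['/', '/'] <+: line.drop k) ∧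
              ¬ (['`'] <+: line.drop k) := by
            intro k h1 h2
            exact ⟨hnob ['/', '*'] f1 (Or.inl rfl) hf1.symm k h1 h2,
                   hnob ['/', '/'] f2 (Or.inr (Or.inl rfl)) hf2.symm k h1 h2,
                   hnob ['`'] f3 (Or.inr (Or.inr rfl)) hf3.symm k h1 h2⟩
          -- j equals one of the three finds
          have hj' : j = f1 ∨ j = f2 ∨ j = f3 := by
            rcases earliestB_cases (earliestB f1 f2) f3 with h123 | h123
            · rcases earliestB_cases f1 f2 with h12 | h12
              · exact Or.inl (by rw [hjdef, h123, h12])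
              · exact Or.inr (Or.inl (by rw [hjdef, h123, h12]))
            · exact Or.inr (Or.inr (by rw [hjdef, h123]))
          -- a marker starts at j, and i ≤ j
          have hmark : ['/', '*'] <+: line.drop j.toNat ∨ ['/', '/'] <+: line.drop j.toNat ∨
              ['`'] <+: line.drop j.toNat := by
            rcases hj' with he | he | he
            · refine Or.inl ?_
              have hp := (findFrom_pos_facts line ['/', '*'] i hk (by rw [← hf1, ← he]; exact hj0)).2.1
              rw [← hf1, ← he] at hp
              exact hp
            · refine Or.inr (Or.inl ?_)
              have hp := (findFrom_pos_facts line ['/', '/'] i hk (by rw [← hf2, ← he]; exact hj0)).2.1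
              rw [← hf2, ← he] at hp
              exact hp
            · refine Or.inr (Or.inr ?_)
              have hp := (findFrom_pos_facts line ['`'] i hk (by rw [← hf3, ← he]; exact hj0)).2.1
              rw [← hf3, ← he] at hp
              exact hp
          have hij2 : (i : Int) ≤ j := by
            rcases hj' with he | he | he
            · have := hcase ['/', '*'] (by rw [← hf1, ← he]; exact hj0)
              rw [← hf1, ← he] at this
              exact this
            · have := hcase ['/', '/'] (by rw [← hf2, ← he]; exact hj0)
              rw [← hf2, ← he] at this
              exact this
            · have := hcase ['`'] (by rw [← hf3, ← he]; exact hj0)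
              rw [← hf3, ← he] at this
              exact this
          have hj_lt : j.toNat < line.length := by
            rcases hmark with hm | hm | hm <;>
              (have := hm.length_le; simp only [List.length_drop, List.length_cons,
                List.length_nil] at this; omega)
          have hij : i ≤ j.toNat := by omega
          rw [stripLineA_copy line (List.flatten pieces) i j.toNat hij (le_of_lt hj_lt) hno]
          rw [stripLineA, dif_pos hj_lt]
          have hpiece : PySem.List.slice line (some (i : Int)) (some j) =
              (line.drop i).take (j.toNat - i) := by
            rw [PySem.List.slice_toNat line (by omega) hj0]
            simp
          by_cases hsw : PySem.Chars.startswith (line.drop j.toNat) ['/', '*'] = true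
          · rw [dif_pos hsw]
            simp only [hsw, if_true]
            rw [show (List.flatten pieces ++ (line.drop i).take (j.toNat - i)) =
                  List.flatten (pieces ++ [PySem.Chars.slice line (some (i : Int)) (some j)]) by
                simp [hpiece]]
            exact ih (j.toNat + 2) true _ (by omega)
          · rw [dif_neg hsw]
            have hor : (PySem.Chars.startswith (line.drop j.toNat) ['/', '/'] ||
                PySem.Chars.startswith (line.drop j.toNat) ['`']) = true := by
              rcases hmark with hm | hm | hm
              · exact absurd ((PySem.Chars.startswith_iff _ _).mpr hm) hsw
              · simp [(PySem.Chars.startswith_iff _ _).mpr hm]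
              · simp [(PySem.Chars.startswith_iff _ _).mpr hm]
            simp only [Bool.not_eq_true] at hsw
            simp only [hsw, Bool.false_eq_true, if_false, hor, if_true]
            rw [joinNil_eq_flatten]
            simp [hpiece]
  exact aux (line.length - i) i inb pieces le_rfl

theorem splitOn_go_ne_nil (sep : List Char) (fuel : Nat) :
    ∀ (l cur : List Char) (acc : List (List Char)),
    PySem.Chars.splitOn.go sep fuel l cur acc ≠ [] := by
  induction fuel with
  | zero => intro l cur acc; simp [PySem.Chars.splitOn.go]
  | succ n ih =>
    intro l cur acc
    cases l with
    | nil => simp [PySem.Chars.splitOn.go]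
    | cons c rest =>
      rw [PySem.Chars.splitOn.go]
      split
      · exact ih _ _ _
      · exact ih _ _ _

theorem splitOn_ne_nil (s sep : List Char) : PySem.Chars.splitOn s sep ≠ [] :=
  splitOn_go_ne_nil sep _ s [] []

theorem enumerate_append {α : Type} (xs ys : List α) (s : Int) :
    PySem.List.enumerate (xs ++ ys) s =
      PySem.List.enumerate xs s ++ PySem.List.enumerate ys (s + xs.length) := by
  induction xs generalizing s with
  | nil => simp [PySem.List.enumerate_nil]
  | cons x xs ih => simp [PySem.List.enumerate_cons, ih]; ring_nf

-- per-line emission agrees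
theorem emit_eq (s : List Char) (res : List String) :
    emitA s res = res ++ emitB s := by
  simp only [emitA, emitB]
  set parts := PySem.Chars.splitOn s [';'] with hparts
  by_cases hend : PySem.Chars.endswith s [';'] = true
  · -- line ends in ';': A appends ';' to every kept part, idx is irrelevant
    have E1 : ∀ (ps : List (List Char)) (s0 : Int) (acc : List String),
        (PySem.List.enumerate ps s0).foldl (fun res ip =>
          if PySem.Chars.strip ip.2 = [] then res
          else if ip.1 < (parts.length : Int) - 1 then
            res ++ [String.ofList (PySem.Chars.strip ip.2 ++ [';'])]
          else if PySem.Chars.endswith s [';'] then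
            res ++ [String.ofList (PySem.Chars.strip ip.2 ++ [';'])]
          else res ++ [String.ofList (PySem.Chars.strip ip.2)]) acc =
        acc ++ ((ps.map PySem.Chars.strip).filter (· ≠ [])).map
          (fun p => String.ofList (p ++ [';'])) := by
      intro ps
      induction ps with
      | nil => intro s0 acc; simp [PySem.List.enumerate_nil]
      | cons p ps ihp =>
        intro s0 acc
        rw [PySem.List.enumerate_cons]
        simp only [List.foldl_cons, List.map_cons]
        by_cases hp : PySem.Chars.strip p = []
        · rw [ihp]
          simp [hp]
        · rw [ihp]
          by_cases hidx : (s0 : Int) < (parts.length : Int) - 1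
          · simp [hp, hidx]
          · simp [hp, hidx, hend]
    rw [if_pos hend, E1]
  · -- line does not end in ';': the last part is emitted bare
    have hne : parts ≠ [] := splitOn_ne_nil s [';']
    have E2 : ∀ (ps : List (List Char)) (s0 : Int) (acc : List String),
        0 ≤ s0 → s0 + ps.length ≤ (parts.length : Int) - 1 →
        (PySem.List.enumerate ps s0).foldl (fun res ip =>
          if PySem.Chars.strip ip.2 = [] then res
          else if ip.1 < (parts.length : Int) - 1 then
            res ++ [String.ofList (PySem.Chars.strip ip.2 ++ [';'])]
          else if PySem.Chars.endswith s [';'] then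
            res ++ [String.ofList (PySem.Chars.strip ip.2 ++ [';'])]
          else res ++ [String.ofList (PySem.Chars.strip ip.2)]) acc =
        acc ++ ((ps.map PySem.Chars.strip).filter (· ≠ [])).map
          (fun p => String.ofList (p ++ [';'])) := by
      intro ps
      induction ps with
      | nil => intro s0 acc _ _; simp [PySem.List.enumerate_nil]
      | cons p ps ihp =>
        intro s0 acc h0 hlen
        rw [PySem.List.enumerate_cons]
        simp only [List.foldl_cons, List.map_cons, List.length_cons] at hlen ⊢
        have hidx : (s0 : Int) < (parts.length : Int) - 1 := by
          push_cast at hlen ⊢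
          omega
        by_cases hp : PySem.Chars.strip p = []
        · rw [ihp (s0 + 1) _ (by omega) (by push_cast at hlen ⊢; omega)]
          simp [hp]
        · rw [ihp (s0 + 1) _ (by omega) (by push_cast at hlen ⊢; omega)]
          simp [hp, hidx]
    have hsplit : parts = parts.dropLast ++ [parts.getLast hne] :=
      (List.dropLast_append_getLast hne).symm
    have hL : parts.dropLast.length = parts.length - 1 := List.length_dropLast
    have hlast : ¬ ((parts.dropLast.length : Int) < (parts.length : Int) - 1) := by
      have hpos : 0 < parts.length := List.length_pos_iff.mpr hne
      rw [hL]
      push_cast [hpos]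
      omega
    rw [show PySem.List.enumerate parts 0 =
          PySem.List.enumerate (parts.dropLast ++ [parts.getLast hne]) 0 from by
        rw [← hsplit]]
    rw [enumerate_append, List.foldl_append]
    rw [E2 _ 0 res (by omega) (by
      have hpos : 0 < parts.length := List.length_pos_iff.mpr hne
      rw [hL]; push_cast [hpos]; omega)]
    rw [PySem.List.enumerate_cons, PySem.List.enumerate_nil]
    simp only [List.foldl_cons, List.foldl_nil, Int.zero_add]
    rw [if_neg hend, if_neg hlast]
    have hmapsplit : parts.map PySem.Chars.strip =
        parts.dropLast.map PySem.Chars.strip ++ [PySem.Chars.strip (parts.getLast hne)] := by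
      conv_lhs => rw [hsplit]
      simp
    rw [PySem.List.slice_to_neg_one, hmapsplit, List.dropLast_concat,
      PySem.List.pyGet?_neg_one_append_singleton]
    by_cases hp : PySem.Chars.strip (parts.getLast hne) = []
    · simp [hp, hend]
    · simp [hp, hend]

-- phase-1 accumulator law: the collected cleaned lines split off the prefix
theorem foldB1_acc (scan : String → Bool → List Char × Bool) :
    ∀ (ls : List String) (blk : Bool) (cl : List (List Char)),
    ls.foldl (fun st line =>
      (if PySem.Chars.strip (scan line st.2).1 = [] then st.1
       else st.1 ++ [PySem.Chars.strip (scan line st.2).1], (scan line st.2).2)) (cl, blk) =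
    (cl ++ (ls.foldl (fun st line =>
      (if PySem.Chars.strip (scan line st.2).1 = [] then st.1
       else st.1 ++ [PySem.Chars.strip (scan line st.2).1], (scan line st.2).2)) ([], blk)).1,
     (ls.foldl (fun st line =>
      (if PySem.Chars.strip (scan line st.2).1 = [] then st.1
       else st.1 ++ [PySem.Chars.strip (scan line st.2).1], (scan line st.2).2)) ([], blk)).2) := by
  intro ls
  induction ls with
  | nil => intro blk cl; simp
  | cons line ls ih =>
    intro blk cl
    simp only [List.foldl_cons]
    by_cases hs : PySem.Chars.strip (scan line blk).1 = []
    · simp only [hs, reduceIte]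
      rw [ih]
    · simp only [hs, reduceIte]
      rw [ih ((scan line blk).2) (cl ++ [PySem.Chars.strip (scan line blk).1]),
        ih ((scan line blk).2) ([] ++ [PySem.Chars.strip (scan line blk).1])]
      simp

-- A's interleaved emission = B's collect-then-emit
theorem outer_eq (scan : String → Bool → List Char × Bool) :
    ∀ (ls : List String) (blk : Bool) (res : List String),
    (ls.foldl (fun st line =>
        if PySem.Chars.strip (scan line st.2).1 = [] then (st.1, (scan line st.2).2)
        else (emitA (PySem.Chars.strip (scan line st.2).1) st.1, (scan line st.2).2))
      (res, blk)).1
    = res ++ ((ls.foldl (fun st line =>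
        (if PySem.Chars.strip (scan line st.2).1 = [] then st.1
         else st.1 ++ [PySem.Chars.strip (scan line st.2).1], (scan line st.2).2))
      ([], blk)).1).flatMap emitB := by
  intro ls
  induction ls with
  | nil => intro blk res; simp
  | cons line ls ih =>
    intro blk res
    simp only [List.foldl_cons]
    by_cases hs : PySem.Chars.strip (scan line blk).1 = []
    · simp only [hs, reduceIte]
      rw [ih]
    · simp only [hs, reduceIte]
      rw [ih, foldB1_acc scan ls ((scan line blk).2) ([] ++ [PySem.Chars.strip (scan line blk).1])]
      rw [emit_eq]
      simp

theorem strip_verilog_spec' (lines : List String) :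
    strip_verilog lines = strip_verilog_alt lines := by
  simp only [strip_verilog, strip_verilog_alt]
  have hswap : (fun (st : List String × Bool) (line : String) =>
      if PySem.Chars.strip (stripLineA line.toList st.2 0 []).1 = []
      then (st.1, (stripLineA line.toList st.2 0 []).2)
      else (emitA (PySem.Chars.strip (stripLineA line.toList st.2 0 []).1) st.1,
            (stripLineA line.toList st.2 0 []).2)) =
      (fun (st : List String × Bool) (line : String) =>
      if PySem.Chars.strip ((fun (l : String) (b : Bool) => cleanLineB l.toList b 0 []) line st.2).1 = []
      then (st.1, ((fun (l : String) (b : Bool) => cleanLineB l.toList b 0 []) line st.2).2)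
      else (emitA (PySem.Chars.strip ((fun (l : String) (b : Bool) => cleanLineB l.toList b 0 []) line st.2).1) st.1,
            ((fun (l : String) (b : Bool) => cleanLineB l.toList b 0 []) line st.2).2)) := by
    funext st line
    have h := scan_eq line.toList 0 st.2 []
    simp only [List.flatten_nil] at h
    simp only [h]
  rw [hswap, outer_eq (fun (l : String) (b : Bool) => cleanLineB l.toList b 0 []) lines false []]
  rw [PySem.List.foldl_append_eq_flatMap emitB]

-- ===== VERDICT (by name: the statement is the Claim_ definition above) =====
theorem strip_verilog_spec : Claim_equal_strip_verilog := by
  intro lines _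
  unfold Spec_strip_verilog
  exact strip_verilog_spec' lines
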